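-- pv_equiv track=rewrite | github.com/TempeHS/2025.LiamW.PythonFundamentals | 2-Loops/plates/plates.py | check
-- ===== SOURCE A (Python) =====
-- def check(t):
--     foundnumber = False
--     for letter in t:
--         if letter.isnumeric():
--             foundnumber = True
--         elif foundnumber:
--             return False
--     return True
-- ===== SOURCE B (Python) =====
-- def check(t):
--     idx = next((i for i, c in enumerate(t) if c.isnumeric()), len(t))
--     return all(c.isnumeric() for c in t[idx:])
-- ===== Notes on version B (the rewrite author's own statement) =====
-- stated objective: alternative
-- what changed: Replaces A's stateful flag-carrying scan with a locate-then-validate decomposition: find the index of the first numeric character, then check that the whole tail from there is numeric.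
import Mathlib
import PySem

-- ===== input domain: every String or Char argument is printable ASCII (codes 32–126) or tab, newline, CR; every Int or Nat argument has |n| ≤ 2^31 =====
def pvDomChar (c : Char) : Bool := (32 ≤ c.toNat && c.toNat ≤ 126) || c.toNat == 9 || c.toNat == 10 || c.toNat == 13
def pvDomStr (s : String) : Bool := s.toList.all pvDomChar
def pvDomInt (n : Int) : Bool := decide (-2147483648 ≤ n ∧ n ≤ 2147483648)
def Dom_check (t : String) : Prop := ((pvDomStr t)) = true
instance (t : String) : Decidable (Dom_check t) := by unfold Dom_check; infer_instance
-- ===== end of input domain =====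

-- B locates the first numeric character, then validates that the entire tail is numeric
-- (a different decomposition of A's flag-carrying single scan; same cost).
-- ===== PORT A =====
-- loop over the characters carrying the `foundnumber` flag
def checkGo (foundnumber : Bool) (cs : List Char) : Bool :=
  match cs with
  | [] => true
  | c :: rest =>
      if PySem.Chars.isdigit c then checkGo true rest
      else if foundnumber then false
      else checkGo foundnumber rest

def check (t : String) : Bool := checkGo false t.toList

-- ===== PORT B =====
-- idx = index of first numeric char (len if none); then all of t[idx:] numeric
def check_alt (t : String) : Bool :=
  let cs := t.toList
  let idx := cs.findIdx PySem.Chars.isdigit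
  (cs.drop idx).all PySem.Chars.isdigit

-- ===== PRECONDITION & SPEC =====
def Spec_check (t : String) (out : Bool) : Prop := out = check_alt t
instance (t : String) (out : Bool) : Decidable (Spec_check t out) := by unfold Spec_check; infer_instance

-- ===== CLAIM (what is proved, stated in full; the proofs are below) =====
def Claim_equal_check : Prop := ∀ (t : String), Dom_check t → Spec_check t (check t)

-- ===== LEMMAS AND PROOFS =====

lemma checkGo_true (cs : List Char) :
    checkGo true cs = cs.all PySem.Chars.isdigit := by
  induction cs with
  | nil => rfl
  | cons c rest ih =>
      by_cases h : PySem.Chars.isdigit c = true <;>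
        simp [checkGo, List.all_cons, h, ih]

lemma checkGo_false (cs : List Char) :
    checkGo false cs =
      (cs.drop (cs.findIdx PySem.Chars.isdigit)).all PySem.Chars.isdigit := by
  induction cs with
  | nil => rfl
  | cons c rest ih =>
      by_cases h : PySem.Chars.isdigit c = true
      · simp [checkGo, h, checkGo_true, List.findIdx_cons, List.all_cons]
      · simp [checkGo, h, ih, List.findIdx_cons]

-- ===== VERDICT =====
theorem check_spec : Claim_equal_check := by
  intro t _
  unfold Spec_check check check_alt
  exact checkGo_false t.toList
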